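-- pv_equiv track=rewrite | github.com/MoonlitMoo/casa-pipeline | domain/datatable.py | construct_timegroup
-- ===== SOURCE A (Python) =====
-- def construct_timegroup(rows, group_id_list, group_association_list):
--     timetable_dict = {x: [[], []] for x in group_id_list}
--     for (idx, group_id) in enumerate(group_association_list):
--         if group_id not in group_id_list:
--             continue
--         timetable_dict[group_id][0].append(rows[idx])
--         timetable_dict[group_id][1].append(idx)
--     return timetable_dict
-- ===== SOURCE B (Python) =====
-- def construct_timegroup(rows, group_id_list, group_association_list):
--     # Per-group emit: for each distinct group id (first-occurrence order), gather
--     # its matching rows and indices by a direct filtered scan of the association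
--     # list.  No pre-seeded mutable dict, no membership test inside the loop.
--     return {gid: [[rows[i] for i, g in enumerate(group_association_list) if g == gid],
--                   [i for i, g in enumerate(group_association_list) if g == gid]]
--             for gid in dict.fromkeys(group_id_list)}
-- ===== Notes on version B (the rewrite author's own statement) =====
-- stated objective: simpler
-- what changed: A makes a single mutating pass that appends each association entry into a pre-seeded per-group dict, filtering with an 'in group_id_list' test; B is a dict comprehension over the deduplicated group ids that, for each group id, emits its value directly via filtered scans of the association list - a per-key emit instead of an incremental accumulation, with no membership test and no mutation.
import Mathlib
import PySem

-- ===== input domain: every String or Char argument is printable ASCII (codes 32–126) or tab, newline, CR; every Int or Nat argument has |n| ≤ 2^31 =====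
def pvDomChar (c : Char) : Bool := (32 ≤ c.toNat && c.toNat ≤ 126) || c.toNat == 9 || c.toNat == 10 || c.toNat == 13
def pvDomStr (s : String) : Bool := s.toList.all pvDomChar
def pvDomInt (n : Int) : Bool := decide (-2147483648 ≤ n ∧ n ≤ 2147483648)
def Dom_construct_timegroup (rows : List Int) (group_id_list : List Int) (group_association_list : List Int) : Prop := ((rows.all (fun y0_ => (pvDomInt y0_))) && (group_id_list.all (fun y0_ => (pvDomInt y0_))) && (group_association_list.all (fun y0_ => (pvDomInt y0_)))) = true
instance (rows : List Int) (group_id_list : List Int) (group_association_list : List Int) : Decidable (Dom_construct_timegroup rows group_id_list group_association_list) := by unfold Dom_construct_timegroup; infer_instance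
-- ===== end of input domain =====

-- B replaces A's single mutating accumulation pass by a dict comprehension that emits each
-- distinct group id's value directly via filtered scans of the association list (simpler).

-- ===== PORT A =====
-- one loop step of A: 'if group_id in group_id_list: dict[gid][0].append(rows[idx]); dict[gid][1].append(idx)'
def tgStepA (rows : List Int) (group_id_list : List Int)
    (d : PySem.Dict Int (List (List Int))) (p : Int × Int) : PySem.Dict Int (List (List Int)) :=
  if p.2 ∈ group_id_list then
    d.modify p.2 [[], []] (fun v =>
      [v.getD 0 [] ++ [PySem.List.pyGetD rows p.1 0], v.getD 1 [] ++ [p.1]])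
  else d

def construct_timegroup (rows : List Int) (group_id_list : List Int) (group_association_list : List Int) : List (Int × List (List Int)) :=
  -- timetable_dict = {x: [[], []] for x in group_id_list}
  let init : PySem.Dict Int (List (List Int)) :=
    group_id_list.foldl (fun d x => d.insert x [[], []]) PySem.Dict.empty
  -- for (idx, group_id) in enumerate(group_association_list): …
  ((PySem.List.enumerate group_association_list 0).foldl (tgStepA rows group_id_list) init).items

-- ===== PORT B =====
-- the value B emits for one group id: '[[rows[i] for i, g in enumerate(gal) if g == gid],
--                                       [i for i, g in enumerate(gal) if g == gid]]'
def tgValB (rows : List Int) (group_association_list : List Int) (g : Int) : List (List Int) :=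
  [((PySem.List.enumerate group_association_list 0).filter (fun p => p.2 == g)).map
      (fun p => PySem.List.pyGetD rows p.1 0),
   ((PySem.List.enumerate group_association_list 0).filter (fun p => p.2 == g)).map (fun p => p.1)]

def construct_timegroup_alt (rows : List Int) (group_id_list : List Int) (group_association_list : List Int) : List (Int × List (List Int)) :=
  -- {gid: … for gid in dict.fromkeys(group_id_list)}
  ((PySem.List.dedup group_id_list).foldl
      (fun d g => d.insert g (tgValB rows group_association_list g)) PySem.Dict.empty).items

-- ===== PRECONDITION & SPEC =====
-- Pre_ excludes exactly the inputs where Python A raises IndexError: an association entry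
-- whose group id is in group_id_list but whose index is out of range of rows.
def Pre_construct_timegroup (rows : List Int) (group_id_list : List Int) (group_association_list : List Int) : Prop :=
  ∀ p ∈ PySem.List.enumerate group_association_list 0,
    p.2 ∈ group_id_list → p.1 < (rows.length : Int)
instance (rows : List Int) (group_id_list : List Int) (group_association_list : List Int) : Decidable (Pre_construct_timegroup rows group_id_list group_association_list) := by unfold Pre_construct_timegroup; infer_instance

def pvWitness_construct_timegroup : List Int × List Int × List Int := ([5, 6], [1, 2], [1, 1])

def Spec_construct_timegroup (rows : List Int) (group_id_list : List Int) (group_association_list : List Int) (out : List (Int × List (List Int))) : Prop := out = construct_timegroup_alt rows group_id_list group_association_list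
instance (rows : List Int) (group_id_list : List Int) (group_association_list : List Int) (out : List (Int × List (List Int))) : Decidable (Spec_construct_timegroup rows group_id_list group_association_list out) := by unfold Spec_construct_timegroup; infer_instance

-- ===== CLAIM (what is proved, stated in full; the proofs are below) =====
def Claim_equal_construct_timegroup : Prop := ∀ (rows : List Int) (group_id_list : List Int) (group_association_list : List Int), Dom_construct_timegroup rows group_id_list group_association_list → Pre_construct_timegroup rows group_id_list group_association_list → Spec_construct_timegroup rows group_id_list group_association_list (construct_timegroup rows group_id_list group_association_list)

-- ===== LEMMAS AND PROOFS =====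

-- a fold of inserts whose value does not depend on the accumulator: lookup afterwards
lemma tg_foldl_insert_getD {ν : Type} (V : Int → ν) (l : List Int) (d : PySem.Dict Int ν)
    (g : Int) (dflt : ν) :
    (l.foldl (fun d x => d.insert x (V x)) d).getD g dflt
      = if g ∈ l then V g else d.getD g dflt := by
  induction l generalizing d with
  | nil => simp
  | cons x l ih =>
    simp only [List.foldl_cons, ih, List.mem_cons, PySem.Dict.getD_insert]
    by_cases hg : g = x <;> by_cases hl : g ∈ l <;> simp [hg, hl]

-- A's loop leaves the key set of the seeded dict unchanged
lemma tg_foldA_keys (rows group_id_list : List Int) (l : List (Int × Int))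
    (d : PySem.Dict Int (List (List Int))) (h : ∀ x ∈ group_id_list, d.contains x = true) :
    (l.foldl (tgStepA rows group_id_list) d).keys = d.keys := by
  induction l generalizing d with
  | nil => rfl
  | cons p l ih =>
    simp only [List.foldl_cons, tgStepA]
    by_cases hm : p.2 ∈ group_id_list
    · rw [if_pos hm]
      have hc := h p.2 hm
      rw [ih _ ?_, PySem.Dict.keys_modify, PySem.Dict.keys_insert_of_contains _ _ hc]
      intro x hx
      rw [PySem.Dict.contains_modify]
      simp [h x hx]
    · rw [if_neg hm]; exact ih d h

-- the value A's loop accumulates at key g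
lemma tg_foldA_getD (rows group_id_list : List Int) (l : List (Int × Int))
    (d : PySem.Dict Int (List (List Int))) (g : Int) (a b : List Int)
    (hd : d.getD g [[], []] = [a, b]) :
    (l.foldl (tgStepA rows group_id_list) d).getD g [[], []]
      = [a ++ (l.filter (fun p => decide (p.2 ∈ group_id_list) && p.2 == g)).map
              (fun p => PySem.List.pyGetD rows p.1 0),
         b ++ (l.filter (fun p => decide (p.2 ∈ group_id_list) && p.2 == g)).map (fun p => p.1)] := by
  induction l generalizing d a b with
  | nil => simpa using hd
  | cons p l ih =>
    simp only [List.foldl_cons, tgStepA, List.filter_cons]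
    by_cases hm : p.2 ∈ group_id_list
    · rw [if_pos hm]
      by_cases hg : p.2 = g
      · have hmg : g ∈ group_id_list := hg ▸ hm
        rw [ih _ (a ++ [PySem.List.pyGetD rows p.1 0]) (b ++ [p.1]) ?_]
        · simp [hg, hmg, List.append_assoc]
        · rw [PySem.Dict.getD_modify, if_pos hg.symm, hg, hd]
          simp
      · rw [ih _ a b ?_]
        · simp [hg]
        · rw [PySem.Dict.getD_modify, if_neg (fun h => hg h.symm), hd]
    · rw [if_neg hm, ih _ a b hd]
      simp [hm]

-- ===== VERDICT (by name: the statement is the Claim_ definition above) =====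
theorem construct_timegroup_spec : Claim_equal_construct_timegroup := by
  intro rows gid ga _ _
  unfold Spec_construct_timegroup construct_timegroup construct_timegroup_alt
  set l := PySem.List.enumerate ga 0 with hl
  -- the seeded dict of A
  set init : PySem.Dict Int (List (List Int)) :=
    gid.foldl (fun d x => d.insert x [[], []]) PySem.Dict.empty with hinit
  have hkeys_init : init.keys = PySem.Set.ofList gid := by
    rw [hinit, PySem.Dict.keys_foldl_insert gid (fun _ _ => [[], []]) PySem.Dict.empty]
    simp [PySem.Set.update, PySem.Set.ofList, PySem.Dict.keys_empty]
  have hcont : ∀ x ∈ gid, init.contains x = true := by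
    intro x hx
    rw [PySem.Dict.contains_iff_mem_keys, hkeys_init]
    exact (PySem.Set.mem_ofList gid x).mpr hx
  have hkeysA : (l.foldl (tgStepA rows gid) init).keys = PySem.Set.ofList gid := by
    rw [tg_foldA_keys rows gid l init hcont, hkeys_init]
  have hnodupA : (l.foldl (tgStepA rows gid) init).keys.Nodup := by
    rw [hkeysA, ← PySem.List.dedup_eq_ofList]; exact PySem.List.nodup_dedup gid
  -- B side: dict comprehension over the deduplicated group ids
  set resB : PySem.Dict Int (List (List Int)) :=
    (PySem.List.dedup gid).foldl (fun d g => d.insert g (tgValB rows ga g)) PySem.Dict.empty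
    with hresB
  have hkeysB : resB.keys = PySem.Set.ofList gid := by
    rw [hresB, PySem.Dict.keys_foldl_insert (PySem.List.dedup gid)
          (fun _ g => tgValB rows ga g) PySem.Dict.empty]
    simp only [PySem.Set.update, PySem.Dict.keys_empty, PySem.List.dedup_eq_ofList]
    rw [← PySem.Set.ofList_eq_foldl, PySem.Set.ofList_ofList]
  have hnodupB : resB.keys.Nodup := by
    rw [hkeysB, ← PySem.List.dedup_eq_ofList]; exact PySem.List.nodup_dedup gid
  rw [PySem.Dict.items_eq_map_keys _ hnodupA [[], []],
      PySem.Dict.items_eq_map_keys _ hnodupB [[], []], hkeysA, hkeysB]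
  apply List.map_congr_left
  intro g hg
  have hgmem : g ∈ gid := (PySem.Set.mem_ofList gid g).mp hg
  -- for a key g of the output dicts, A's membership-filtered scan is just the g-filter
  have hfilter :
      l.filter (fun p => decide (p.2 ∈ gid) && p.2 == g) = l.filter (fun p => p.2 == g) := by
    apply List.filter_congr
    intro p _
    by_cases hpg : p.2 = g
    · simp [hpg, hgmem]
    · simp [hpg]
  have hA : (l.foldl (tgStepA rows gid) init).getD g [[], []]
      = [(l.filter (fun p => decide (p.2 ∈ gid) && p.2 == g)).map
            (fun p => PySem.List.pyGetD rows p.1 0),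
         (l.filter (fun p => decide (p.2 ∈ gid) && p.2 == g)).map (fun p => p.1)] := by
    have hd : init.getD g [[], []] = [[], []] := by
      rw [hinit, tg_foldl_insert_getD (fun _ => [[], []]) gid PySem.Dict.empty g [[], []]]
      split <;> simp
    simpa using tg_foldA_getD rows gid l init g [] [] hd
  have hB : resB.getD g [[], []] = tgValB rows ga g := by
    rw [hresB, tg_foldl_insert_getD (tgValB rows ga) (PySem.List.dedup gid)
          PySem.Dict.empty g [[], []],
        if_pos ((PySem.List.mem_dedup gid g).mpr hgmem)]
  rw [hA, hB, hfilter]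
  rfl
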